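-- pv_equiv track=rewrite | github.com/FUUbi/PSSM | roc.py | calculateTruePositive
-- ===== SOURCE A (Python) =====
-- def calculateTruePositive(pco, posScores):
--     truePositiveList = list()
--     pco = pco
--     posScores = posScores
--     value = 0
--     for i in range(len(pco)):
--         for x in range(len(posScores)):
--             if posScores[x] > pco[i]:
--                 value +=1
--         truePositiveList.append(value)
--         value = 0
--     return truePositiveList
-- ===== SOURCE B (Python) =====
-- def calculateTruePositive(pco, posScores):
--     ss = sorted(posScores)
--     m = len(ss)
--     result = []
--     for t in pco:
--         lo = 0
--         hi = m
--         while lo < hi: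
--             mid = (lo + hi) // 2
--             if t < ss[mid]:
--                 hi = mid
--             else:
--                 lo = mid + 1
--         result.append(m - lo)
--     return result
-- ===== Notes on version B (the rewrite author's own statement) =====
-- stated objective: faster
-- what changed: Sort posScores once, then answer each threshold with a hand-written binary search (upper bound) instead of rescanning all of posScores for every threshold.
import Mathlib
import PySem

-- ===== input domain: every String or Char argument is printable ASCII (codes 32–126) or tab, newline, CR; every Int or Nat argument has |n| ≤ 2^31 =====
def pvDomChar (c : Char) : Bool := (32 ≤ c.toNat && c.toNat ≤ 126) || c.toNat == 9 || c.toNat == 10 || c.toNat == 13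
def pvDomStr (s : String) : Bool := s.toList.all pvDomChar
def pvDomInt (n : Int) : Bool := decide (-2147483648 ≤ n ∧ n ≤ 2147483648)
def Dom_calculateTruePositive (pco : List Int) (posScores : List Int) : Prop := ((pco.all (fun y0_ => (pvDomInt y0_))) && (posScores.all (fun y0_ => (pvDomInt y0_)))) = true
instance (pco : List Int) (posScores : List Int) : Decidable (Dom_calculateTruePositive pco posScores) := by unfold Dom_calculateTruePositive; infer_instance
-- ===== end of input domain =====

-- B replaces A's rescan of posScores for every threshold by one sort of posScores plus a
-- binary search per threshold (objective: faster; asymptotic change measured by the check).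

-- ===== PORT A =====
-- state: (truePositiveList, value); value is appended then reset to 0, as in A
def calculateTruePositive (pco : List Int) (posScores : List Int) : List Int :=
  ((PySem.List.pyRange 0 (PySem.List.len pco)).foldl
    (fun (st : List Int × Int) i =>
      let value :=
        (PySem.List.pyRange 0 (PySem.List.len posScores)).foldl
          (fun v x =>
            if PySem.List.pyGetD posScores x 0 > PySem.List.pyGetD pco i 0 then v + 1 else v)
          st.2
      (st.1 ++ [value], 0))
    ([], 0)).1

-- ===== PORT B =====
-- hand-written binary search of Source B ('while lo < hi: …'); lo, hi are nonnegative ints in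
-- Python so Nat arithmetic and Nat division are exact for (lo + hi) // 2; ss[mid] is always
-- in range (mid < hi ≤ len ss), ported with pyGetD and default 0.
def bsr (ss : List Int) (t : Int) (lo hi : Nat) : Nat :=
  if h : lo < hi then
    let mid := (lo + hi) / 2
    if t < PySem.List.pyGetD ss (mid : Int) 0 then bsr ss t lo mid
    else bsr ss t (mid + 1) hi
  else lo
  termination_by hi - lo
  decreasing_by all_goals omega

def calculateTruePositive_alt (pco : List Int) (posScores : List Int) : List Int :=
  let ss := PySem.List.sorted posScores (fun x => x) false
  let m := ss.length
  pco.foldl (fun result t => result ++ [((m : Int) - (bsr ss t 0 m : Int))]) []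

-- ===== PRECONDITION & SPEC =====
def Spec_calculateTruePositive (pco : List Int) (posScores : List Int) (out : List Int) : Prop := out = calculateTruePositive_alt pco posScores
instance (pco : List Int) (posScores : List Int) (out : List Int) : Decidable (Spec_calculateTruePositive pco posScores out) := by unfold Spec_calculateTruePositive; infer_instance

-- ===== CLAIM (what is proved, stated in full; the proofs are below) =====
def Claim_equal_calculateTruePositive : Prop := ∀ (pco : List Int) (posScores : List Int), Dom_calculateTruePositive pco posScores → Spec_calculateTruePositive pco posScores (calculateTruePositive pco posScores)

-- ===== LEMMAS AND PROOFS =====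

-- A's result is the per-threshold count of posScores strictly above the threshold.
theorem calcA_eq_map (pco posScores : List Int) :
    calculateTruePositive pco posScores
      = pco.map (fun t => ((posScores.countP (fun s => decide (t < s)) : Nat) : Int)) := by
  unfold calculateTruePositive
  rw [PySem.List.foldl_pyRange_pyGetD pco 0
    (fun (st : List Int × Int) (t : Int) =>
      (st.1 ++ [(PySem.List.pyRange 0 (PySem.List.len posScores)).foldl
        (fun v x => if PySem.List.pyGetD posScores x 0 > t then v + 1 else v) st.2], 0))
    ([], 0) le_rfl]
  simp only [Int.toNat_zero, List.drop_zero]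
  suffices h : ∀ (l : List Int) (acc : List Int),
      (l.foldl
        (fun (st : List Int × Int) t =>
          (st.1 ++ [(PySem.List.pyRange 0 (PySem.List.len posScores)).foldl
            (fun v x => if PySem.List.pyGetD posScores x 0 > t then v + 1 else v) st.2], 0))
        (acc, 0)).1
      = acc ++ l.map (fun t => ((posScores.countP (fun s => decide (t < s)) : Nat) : Int)) by
    simpa using h pco []
  intro l
  induction l with
  | nil => intro acc; simp
  | cons t l ih =>
    intro acc
    simp only [List.foldl_cons, List.map_cons]
    have hinner :
        (PySem.List.pyRange 0 (PySem.List.len posScores)).foldl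
            (fun v x => if PySem.List.pyGetD posScores x 0 > t then v + 1 else v) 0
          = ((posScores.countP (fun s => decide (t < s)) : Nat) : Int) := by
      rw [PySem.List.foldl_pyRange_pyGetD posScores 0 (fun v s => if s > t then v + 1 else v) 0 le_rfl]
      simp only [Int.toNat_zero, List.drop_zero, gt_iff_lt]
      rw [PySem.List.foldl_ite_add_one (fun s => t < s) posScores 0]
      simp
    rw [hinner, ih]; simp

-- boundary invariant of the binary search
theorem bsr_spec (ss : List Int) (t : Int) (hs : ss.Pairwise (· ≤ ·)) :
    ∀ (lo hi : Nat), lo ≤ hi → hi ≤ ss.length →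
      (∀ (j : Nat) (hj : j < ss.length), j < lo → ss[j] ≤ t) →
      (∀ (j : Nat) (hj : j < ss.length), hi ≤ j → t < ss[j]) →
      lo ≤ bsr ss t lo hi ∧ bsr ss t lo hi ≤ hi ∧
      (∀ (j : Nat) (hj : j < ss.length), j < bsr ss t lo hi → ss[j] ≤ t) ∧
      (∀ (j : Nat) (hj : j < ss.length), bsr ss t lo hi ≤ j → t < ss[j]) := by
  intro lo hi
  induction hn : hi - lo using Nat.strong_induction_on generalizing lo hi with
  | _ n ih =>
  intro hle hlen hbelow habove
  rw [bsr]
  by_cases h : lo < hi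
  · simp only [h, dite_true]
    set mid := (lo + hi) / 2 with hmid
    have hmlt : mid < hi := by omega
    have hmge : lo ≤ mid := by omega
    have hmlen : mid < ss.length := by omega
    have hget : PySem.List.pyGetD ss (mid : Int) 0 = ss[mid] := by
      rw [PySem.List.pyGetD_natCast]; exact List.getD_eq_getElem _ _ hmlen
    have hmono := List.pairwise_iff_getElem.mp hs
    by_cases hc : t < PySem.List.pyGetD ss (mid : Int) 0
    · simp only [hc, if_true]
      rw [hget] at hc
      obtain ⟨h1, h2, h3, h4⟩ := ih (mid - lo) (by omega) lo mid rfl hmge (by omega) hbelow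
        (fun j hj hja => by
          rcases Nat.eq_or_lt_of_le hja with heq | hlt
          · subst heq; exact hc
          · exact lt_of_lt_of_le hc (hmono mid j hmlen hj hlt))
      exact ⟨h1, le_trans h2 (le_of_lt hmlt), h3, h4⟩
    · simp only [hc, if_false]
      rw [hget] at hc
      rw [not_lt] at hc
      obtain ⟨h1, h2, h3, h4⟩ := ih (hi - (mid + 1)) (by omega) (mid + 1) hi rfl (by omega) hlen
        (fun j hj hja => by
          rcases Nat.lt_succ_iff_lt_or_eq.mp hja with hlt | heq
          · exact le_trans (hmono j mid hj hmlen hlt) hc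
          · subst heq; exact hc)
        habove
      exact ⟨by omega, h2, h3, h4⟩
  · simp only [h, dite_false]
    have heq : lo = hi := by omega
    exact ⟨le_rfl, le_of_eq heq, hbelow, fun j hj hja => habove j hj (le_trans (le_of_eq heq.symm) hja)⟩

theorem count_of_boundary (ss : List Int) (t : Int) (k : Nat) (hk : k ≤ ss.length)
    (h1 : ∀ (j : Nat) (hj : j < ss.length), j < k → ss[j] ≤ t)
    (h2 : ∀ (j : Nat) (hj : j < ss.length), k ≤ j → t < ss[j]) :
    ss.countP (fun s => decide (t < s)) = ss.length - k := by
  conv_lhs => rw [← List.take_append_drop k ss]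
  rw [List.countP_append]
  have htake : (ss.take k).countP (fun s => decide (t < s)) = 0 := by
    rw [List.countP_eq_zero]
    intro a ha
    obtain ⟨i, hi, rfl⟩ := List.mem_iff_getElem.mp ha
    rw [List.getElem_take]
    have : i < k := by simp at hi; omega
    simpa using not_lt.mpr (h1 i (by simp at hi; omega) this)
  have hdrop : (ss.drop k).countP (fun s => decide (t < s)) = (ss.drop k).length := by
    rw [List.countP_eq_length]
    intro a ha
    obtain ⟨i, hi, rfl⟩ := List.mem_iff_getElem.mp ha
    rw [List.getElem_drop]
    simpa using h2 (k + i) (by simp at hi; omega) (by omega)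
  rw [htake, hdrop, List.length_drop]
  omega

-- ===== VERDICT (by name: the statement is the Claim_ definition above) =====
theorem calculateTruePositive_spec : Claim_equal_calculateTruePositive := by
  intro pco posScores _
  unfold Spec_calculateTruePositive calculateTruePositive_alt
  rw [calcA_eq_map]
  simp only []
  rw [PySem.List.foldl_append_singleton_eq_map]
  simp only [List.nil_append]
  apply List.map_congr_left
  intro t _
  set ss := PySem.List.sorted posScores (fun x => x) false with hss
  have hpair : ss.Pairwise (· ≤ ·) := by
    simpa using PySem.List.sorted_pairwise posScores (fun x => x)
  obtain ⟨h0, hle, hbelow, habove⟩ :=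
    bsr_spec ss t hpair 0 ss.length (Nat.zero_le _) le_rfl
      (fun j hj hja => absurd hja (Nat.not_lt_zero j))
      (fun j hj hja => absurd hj (Nat.not_lt.mpr hja))
  have hcount := count_of_boundary ss t (bsr ss t 0 ss.length) hle hbelow habove
  have hperm : posScores.countP (fun s => decide (t < s)) = ss.countP (fun s => decide (t < s)) :=
    ((PySem.List.sorted_perm posScores (fun x => x) false).countP_eq _).symm
  rw [hperm, hcount]
  omega
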